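-- pv_equiv track=rewrite | github.com/AdamSz00/reddit_project_main | ETL/UT/transform2.py | _generate_ids_sequential
-- ===== SOURCE A (Python) =====
-- import string as st
--
-- def _generate_ids_sequential(count, start_num, start_letter):
--     """Generate sequential user IDs from a given starting point."""
--     user_ids = []
--     letters = st.ascii_lowercase
--     letter_index = letters.index(start_letter)
--
--     for _ in range(count):
--         letter_index += 1
--         if letter_index >= len(letters):  # Overflow -> increment number
--             letter_index = 0
--             start_num += 1
--         user_ids.append(f"user{start_num:04d}{letters[letter_index]}")
--
--     return user_ids
-- ===== SOURCE B (Python) =====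
-- import string as st
--
-- def _generate_ids_sequential(count, start_num, start_letter):
--     """Generate sequential user IDs from a given starting point."""
--     letters = st.ascii_lowercase
--     base = letters.index(start_letter)
--     return [
--         f"user{start_num + (base + 1 + k) // 26:04d}{letters[(base + 1 + k) % 26]}"
--         for k in range(count)
--     ]
-- ===== Notes on version B (the rewrite author's own statement) =====
-- stated objective: simpler
-- what changed: Replaces A's loop-carried letter_index/carry state with a stateless list comprehension that computes each element's number and letter directly by divmod on the element's offset.
import Mathlib
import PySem

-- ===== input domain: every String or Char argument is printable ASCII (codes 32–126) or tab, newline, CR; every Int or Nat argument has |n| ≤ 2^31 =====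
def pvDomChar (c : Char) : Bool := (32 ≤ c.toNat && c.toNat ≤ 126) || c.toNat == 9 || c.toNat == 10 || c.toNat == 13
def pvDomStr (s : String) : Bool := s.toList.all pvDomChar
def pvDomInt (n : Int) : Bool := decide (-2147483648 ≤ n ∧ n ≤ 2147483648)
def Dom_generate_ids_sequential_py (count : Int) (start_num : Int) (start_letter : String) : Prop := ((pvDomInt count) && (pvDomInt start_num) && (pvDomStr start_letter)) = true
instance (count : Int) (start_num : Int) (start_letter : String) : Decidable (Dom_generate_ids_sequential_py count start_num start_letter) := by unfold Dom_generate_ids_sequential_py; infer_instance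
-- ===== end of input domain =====

-- B replaces A's loop-carried letter_index/carry state with a stateless per-element divmod (simpler decomposition, same cost).

-- shared helpers: both Pythons use the same `letters` constant and build each id with the same f-string
def pvLetters : String := "abcdefghijklmnopqrstuvwxyz"
-- f"...{n:04d}..." for an int n is exactly str(n).zfill(4)
def pvFmt04 (n : Int) : String := PySem.Str.zfill (PySem.Int.toStr n) 4
-- letters[i]; on every executed path of either program 0 ≤ i < 26, so the none branch is unreachable
def pvCharIdx (i : Int) : String :=
  match PySem.Str.pyGet? pvLetters i with
  | some c => String.singleton c
  | none => ""
-- f"user{sn:04d}{letters[li]}"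
def pvMkId (sn : Int) (li : Int) : String := "user" ++ pvFmt04 sn ++ pvCharIdx li

-- ===== PORT A =====
-- one iteration of A's for-loop over state (user_ids, letter_index, start_num)
def pvStepA (st : List String × Int × Int) (_ : Int) : List String × Int × Int :=
  let li := st.2.1 + 1
  let p : Int × Int := if li ≥ PySem.Str.len pvLetters then (0, st.2.2 + 1) else (li, st.2.2)
  (st.1 ++ [pvMkId p.2 p.1], p.1, p.2)

def generate_ids_sequential_py (count : Int) (start_num : Int) (start_letter : String) : List String :=
  -- letters.index(start_letter): ValueError (find = -1) is excluded by Pre_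
  ((PySem.List.pyRange 0 count 1).foldl pvStepA
    ([], PySem.Str.find pvLetters start_letter, start_num)).1

-- ===== PORT B =====
def generate_ids_sequential_py_alt (count : Int) (start_num : Int) (start_letter : String) : List String :=
  let base := PySem.Str.find pvLetters start_letter
  (PySem.List.pyRange 0 count 1).map (fun k =>
    pvMkId (start_num + PySem.Int.floordiv (base + 1 + k) 26)
           (PySem.Int.mod (base + 1 + k) 26))

-- ===== PRECONDITION & SPEC =====
-- Pre_ excludes exactly the inputs where letters.index(start_letter) raises ValueError
-- (start_letter not a substring of "abcdefghijklmnopqrstuvwxyz"); both programs raise there.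
def Pre_generate_ids_sequential_py (count : Int) (start_num : Int) (start_letter : String) : Prop :=
  PySem.Str.find pvLetters start_letter ≠ -1

instance (count : Int) (start_num : Int) (start_letter : String) : Decidable (Pre_generate_ids_sequential_py count start_num start_letter) := by unfold Pre_generate_ids_sequential_py; infer_instance

def pvWitness_generate_ids_sequential_py : Int × Int × String := (3, 9998, "y")

def Spec_generate_ids_sequential_py (count : Int) (start_num : Int) (start_letter : String) (out : List String) : Prop := out = generate_ids_sequential_py_alt count start_num start_letter
instance (count : Int) (start_num : Int) (start_letter : String) (out : List String) : Decidable (Spec_generate_ids_sequential_py count start_num start_letter out) := by unfold Spec_generate_ids_sequential_py; infer_instance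

-- ===== CLAIM (what is proved, stated in full; the proofs are below) =====
def Claim_equal_generate_ids_sequential_py : Prop := ∀ (count : Int) (start_num : Int) (start_letter : String), Dom_generate_ids_sequential_py count start_num start_letter → Pre_generate_ids_sequential_py count start_num start_letter → Spec_generate_ids_sequential_py count start_num start_letter (generate_ids_sequential_py count start_num start_letter)

-- ===== LEMMAS AND PROOFS =====

-- under Pre_, the initial letter index lies in [0, 26)
lemma pv_find_bounds (sl : String)
    (h : PySem.Str.find pvLetters sl ≠ -1) :
    0 ≤ PySem.Str.find pvLetters sl ∧ PySem.Str.find pvLetters sl < 26 := by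
  rw [PySem.Str.find_eq] at h ⊢
  have h0 : 0 ≤ PySem.Chars.find pvLetters.toList sl.toList := by
    have := PySem.Chars.neg_one_le_find pvLetters.toList sl.toList
    omega
  refine ⟨h0, ?_⟩
  have hle := PySem.Chars.find_le_length pvLetters.toList sl.toList
  have hlen : (pvLetters.toList.length : Int) = 26 := by decide
  by_contra hlt
  have heq : PySem.Chars.find pvLetters.toList sl.toList = 26 := by omega
  have hspec := (PySem.Chars.find_spec h0).1
  rw [heq] at hspec
  have hdrop : pvLetters.toList.drop (26 : Int).toNat = [] := by decide
  rw [hdrop] at hspec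
  have hnil : sl.toList = [] := List.prefix_nil.mp hspec
  rw [hnil, PySem.Chars.find_nil] at heq
  omega

-- A's fold, started at letter index L ∈ [0,26) and number S, produces B's elements with a
-- closed-form final state
lemma pv_loop (L S : Int) (hL0 : 0 ≤ L) (hL : L < 26) :
    ∀ (n : Nat) (acc : List String),
      (PySem.List.pyRange 0 (n : Int) 1).foldl pvStepA (acc, L, S)
      = (acc ++ (PySem.List.pyRange 0 (n : Int) 1).map
            (fun k => pvMkId (S + (L + 1 + k) / 26) ((L + 1 + k) % 26)),
         (L + n) % 26, S + (L + n) / 26) := by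
  intro n
  induction n with
  | zero =>
    intro acc
    simp [PySem.List.pyRange_one_eq_nil]
    omega
  | succ m ih =>
    intro acc
    have hcast : ((m + 1 : Nat) : Int) = (m : Int) + 1 := by push_cast; ring
    rw [hcast, PySem.List.pyRange_one_succ_right (by positivity),
        List.foldl_append, List.map_append, ih acc]
    simp only [List.foldl_cons, List.foldl_nil, List.map_cons, List.map_nil]
    have hlen : PySem.Str.len pvLetters = 26 := by decide
    simp only [pvStepA, hlen]
    have hm0 : 0 ≤ (L + m) % 26 := Int.emod_nonneg _ (by norm_num)
    have hm1 : (L + m) % 26 < 26 := Int.emod_lt_of_pos _ (by norm_num)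
    by_cases hc : (L + m) % 26 + 1 ≥ 26
    · rw [if_pos hc]
      have h1 : (L + 1 + (m : Int)) % 26 = 0 := by omega
      have h2 : (L + 1 + (m : Int)) / 26 = (L + m) / 26 + 1 := by omega
      have h3 : (L + ((m : Int) + 1)) % 26 = 0 := by omega
      have h4 : (L + ((m : Int) + 1)) / 26 = (L + m) / 26 + 1 := by omega
      simp only [h1, h2, h3, h4, List.append_assoc]
      ring_nf
    · rw [if_neg hc]
      have h1 : (L + 1 + (m : Int)) % 26 = (L + m) % 26 + 1 := by omega
      have h2 : (L + 1 + (m : Int)) / 26 = (L + m) / 26 := by omega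
      have h3 : (L + ((m : Int) + 1)) % 26 = (L + m) % 26 + 1 := by omega
      have h4 : (L + ((m : Int) + 1)) / 26 = (L + m) / 26 := by omega
      simp only [h1, h2, h3, h4, List.append_assoc]

-- ===== VERDICT (by name: the statement is the Claim_ definition above) =====
theorem generate_ids_sequential_py_spec : Claim_equal_generate_ids_sequential_py := by
  intro count start_num start_letter _ hpre
  unfold Spec_generate_ids_sequential_py generate_ids_sequential_py generate_ids_sequential_py_alt
  obtain ⟨hL0, hL⟩ := pv_find_bounds start_letter hpre
  simp only [PySem.Int.floordiv_eq_ediv_of_pos (show (0:Int) < 26 by norm_num),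
             PySem.Int.mod_eq_emod_of_pos (show (0:Int) < 26 by norm_num)]
  by_cases hc : 0 < count
  · have hcnt : ((count.toNat : Nat) : Int) = count := Int.toNat_of_nonneg (le_of_lt hc)
    rw [← hcnt, pv_loop _ _ hL0 hL count.toNat []]
    simp
  · rw [PySem.List.pyRange_one_eq_nil (by omega)]
    simp
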